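-- pv_equiv track=rewrite | github.com/THUSI-Lab/GameVerse | src/game_servers/snake/game/logic.py | update_food_lifespans
-- ===== SOURCE A (Python) =====
-- from typing import List, Tuple, Optional
--
-- def update_food_lifespans(
--     food: List[Tuple[int, int]],
--     food_attributes: List[List[Tuple[int, int]]]
-- ) -> Tuple[List[Tuple[int, int]], List[List[Tuple[int, int]]]]:
--     """
--     Update food lifespans and remove expired food.
--
--     Args:
--         food: List of food positions
--         food_attributes: 2D array of food attributes (lifespan, value)
--
--     Returns:
--         Tuple of (updated food list, updated food attributes)
--     """
--     new_food = []
--     new_food_attributes = [row[:] for row in food_attributes]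
--
--     for food_pos in food:
--         fx, fy = food_pos
--         lifespan, value = food_attributes[fx][fy]
--
--         # Decrease lifespan
--         new_lifespan = lifespan - 1
--
--         if new_lifespan <= 0:
--             # Food expired, remove it
--             new_food_attributes[fx][fy] = (0, 0)
--         else:
--             # Food still valid
--             new_food.append(food_pos)
--             new_food_attributes[fx][fy] = (new_lifespan, value)
--
--     return new_food, new_food_attributes
-- ===== SOURCE B (Python) =====
-- from typing import List, Tuple
--
-- def update_food_lifespans(
--     food: List[Tuple[int, int]],
--     food_attributes: List[List[Tuple[int, int]]]
-- ) -> Tuple[List[Tuple[int, int]], List[List[Tuple[int, int]]]]: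
--     """Mark the food cells in a boolean mask, then rebuild the whole grid
--     functionally from the mask; the food list is filtered in its own pass."""
--     aged = [[False] * len(row) for row in food_attributes]
--     for x, y in food:
--         aged[x][y] = True
--
--     def age(cell):
--         lifespan, value = cell
--         return (lifespan - 1, value) if lifespan > 1 else (0, 0)
--
--     new_food = [pos for pos in food
--                 if food_attributes[pos[0]][pos[1]][0] > 1]
--
--     new_food_attributes = [
--         [age(cell) if aged[i][j] else cell
--          for j, cell in enumerate(row)]
--         for i, row in enumerate(food_attributes)]
--
--     return new_food, new_food_attributes
-- ===== Notes on version B (the rewrite author's own statement) =====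
-- stated objective: alternative
-- what changed: A copies the grid and mutates it cell-by-cell while looping once over food with an if/else; B marks the food cells in a boolean mask grid, filters the food list in a separate comprehension pass, and rebuilds the whole attribute grid functionally in one enumerate scan driven by the mask.
import Mathlib
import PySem

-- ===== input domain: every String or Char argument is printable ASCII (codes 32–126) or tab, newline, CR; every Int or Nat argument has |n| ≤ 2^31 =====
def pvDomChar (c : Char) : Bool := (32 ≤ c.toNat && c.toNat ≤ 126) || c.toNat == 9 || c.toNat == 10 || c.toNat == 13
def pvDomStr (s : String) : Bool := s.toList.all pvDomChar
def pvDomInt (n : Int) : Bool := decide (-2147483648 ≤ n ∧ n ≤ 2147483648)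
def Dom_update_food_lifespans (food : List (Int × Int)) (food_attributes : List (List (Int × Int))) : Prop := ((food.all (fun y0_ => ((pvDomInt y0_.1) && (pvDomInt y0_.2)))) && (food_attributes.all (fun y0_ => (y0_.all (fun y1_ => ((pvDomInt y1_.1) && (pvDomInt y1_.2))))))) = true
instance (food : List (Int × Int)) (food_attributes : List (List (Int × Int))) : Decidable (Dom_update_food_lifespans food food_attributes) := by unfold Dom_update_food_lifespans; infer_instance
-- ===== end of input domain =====

-- B replaces A's copy-then-mutate loop over `food` by a different decomposition: a boolean
-- mask grid marking the food cells, a separate filtering pass over `food`, and one functional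
-- rebuild of the whole attribute grid from the mask (objective: alternative; same asymptotic cost).

-- ===== PORT A =====
def update_food_lifespans (food : List (Int × Int)) (food_attributes : List (List (Int × Int))) : (List (Int × Int)) × (List (List (Int × Int))) :=
  food.foldl (fun st food_pos =>
    match (PySem.List.pyGet? food_attributes food_pos.1).bind
            (fun row => PySem.List.pyGet? row food_pos.2) with
    | none => st
    | some lv =>
      let new_lifespan := lv.1 - 1
      if new_lifespan ≤ 0 then
        (st.1, PySem.List.pySetD st.2 food_pos.1
                 (PySem.List.pySetD (PySem.List.pyGetD st.2 food_pos.1 []) food_pos.2 (0, 0)))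
      else
        (st.1 ++ [food_pos], PySem.List.pySetD st.2 food_pos.1
                 (PySem.List.pySetD (PySem.List.pyGetD st.2 food_pos.1 []) food_pos.2 (new_lifespan, lv.2))))
    ([], food_attributes.map (fun row => PySem.List.slice row none none))

-- ===== PORT B =====
-- B's helper `age` from Source B
def pvAge (cell : Int × Int) : Int × Int :=
  if cell.1 > 1 then (cell.1 - 1, cell.2) else (0, 0)

def update_food_lifespans_alt (food : List (Int × Int)) (food_attributes : List (List (Int × Int))) : (List (Int × Int)) × (List (List (Int × Int))) :=
  let aged0 := food_attributes.map (fun row => row.map (fun _ => false))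
  let aged := food.foldl (fun m p =>
    PySem.List.pySetD m p.1
      (PySem.List.pySetD (PySem.List.pyGetD m p.1 []) p.2 true)) aged0
  let new_food := food.filter (fun pos =>
    decide ((PySem.List.pyGetD (PySem.List.pyGetD food_attributes pos.1 []) pos.2 (0, 0)).1 > 1))
  let new_food_attributes := (PySem.List.enumerate food_attributes 0).map (fun ir =>
    (PySem.List.enumerate ir.2 0).map (fun jc =>
      if PySem.List.pyGetD (PySem.List.pyGetD aged ir.1 []) jc.1 false then pvAge jc.2 else jc.2))
  (new_food, new_food_attributes)

-- ===== PRECONDITION & SPEC =====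
-- a single food position indexes food_attributes without IndexError (Python negative wraparound allowed)
def pvPosOK (food_attributes : List (List (Int × Int))) (pos : Int × Int) : Prop :=
  (-(food_attributes.length : Int) ≤ pos.1 ∧ pos.1 < (food_attributes.length : Int)) ∧
  (-((PySem.List.pyGetD food_attributes (if pos.1 < 0 then pos.1 + food_attributes.length else pos.1) []).length : Int) ≤ pos.2 ∧
    pos.2 < ((PySem.List.pyGetD food_attributes (if pos.1 < 0 then pos.1 + food_attributes.length else pos.1) []).length : Int))

-- Pre_ excludes exactly the inputs on which A raises IndexError (a food position whose
-- indexing into food_attributes fails); B raises there too.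
def Pre_update_food_lifespans (food : List (Int × Int)) (food_attributes : List (List (Int × Int))) : Prop :=
  ∀ pos ∈ food, pvPosOK food_attributes pos
instance (food : List (Int × Int)) (food_attributes : List (List (Int × Int))) : Decidable (Pre_update_food_lifespans food food_attributes) := by
  unfold Pre_update_food_lifespans pvPosOK; infer_instance

def pvWitness_update_food_lifespans : (List (Int × Int)) × (List (List (Int × Int))) :=
  ([(0, 0), (-1, -1)], [[(3, 7), (1, 2)]])

def Spec_update_food_lifespans (food : List (Int × Int)) (food_attributes : List (List (Int × Int))) (out : (List (Int × Int)) × (List (List (Int × Int)))) : Prop := out = update_food_lifespans_alt food food_attributes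
instance (food : List (Int × Int)) (food_attributes : List (List (Int × Int))) (out : (List (Int × Int)) × (List (List (Int × Int)))) : Decidable (Spec_update_food_lifespans food food_attributes out) := by unfold Spec_update_food_lifespans; infer_instance

-- ===== CLAIM (what is proved, stated in full; the proofs are below) =====
def Claim_equal_update_food_lifespans : Prop := ∀ (food : List (Int × Int)) (food_attributes : List (List (Int × Int))), Dom_update_food_lifespans food food_attributes → Pre_update_food_lifespans food food_attributes → Spec_update_food_lifespans food food_attributes (update_food_lifespans food food_attributes)

-- ===== LEMMAS AND PROOFS =====
def pvNN (n : Nat) (i : Int) : Nat := (if i < 0 then i + n else i).toNat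

lemma pvNN_lt {n : Nat} {i : Int} (h1 : -(n : Int) ≤ i) (h2 : i < n) : pvNN n i < n := by
  unfold pvNN; split <;> omega

lemma pvNN_cast {n : Nat} {i : Int} (h1 : -(n : Int) ≤ i) (h2 : i < n) :
    ((pvNN n i : Nat) : Int) = if i < 0 then i + n else i := by
  unfold pvNN; split <;> omega

lemma pvGet_norm {α : Type} {xs : List α} {i : Int} (h1 : -(xs.length : Int) ≤ i) (h2 : i < xs.length) :
    PySem.List.pyGet? xs i = xs[pvNN xs.length i]? := by
  simp only [PySem.List.pyGet?, PySem.List.pyIdx?, pvNN]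
  split_ifs <;> simp_all <;> (try omega) <;> congr 1 <;> omega

lemma pvGetD_norm {α : Type} {xs : List α} {i : Int} (d : α) (h1 : -(xs.length : Int) ≤ i) (h2 : i < xs.length) :
    PySem.List.pyGetD xs i d = xs[pvNN xs.length i]'(pvNN_lt h1 h2) := by
  simp only [PySem.List.pyGetD, pvGet_norm h1 h2]
  rw [List.getElem?_eq_getElem (pvNN_lt h1 h2)]; rfl

lemma pvSetD_norm {α : Type} {xs : List α} {i : Int} (v : α) (h1 : -(xs.length : Int) ≤ i) (h2 : i < xs.length) :
    PySem.List.pySetD xs i v = xs.set (pvNN xs.length i) v := by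
  simp only [PySem.List.pySetD, PySem.List.pySet?, PySem.List.pyIdx?, pvNN]
  split_ifs <;> simp_all <;> (try omega) <;> congr 2 <;> omega

lemma pvRowD (fa : List (List (Int × Int))) (p : Int × Int)
    (h1 : -(fa.length : Int) ≤ p.1) (h2 : p.1 < fa.length) :
    PySem.List.pyGetD fa (if p.1 < 0 then p.1 + fa.length else p.1) []
      = fa[pvNN fa.length p.1]'(pvNN_lt h1 h2) := by
  rw [← pvNN_cast h1 h2, PySem.List.pyGetD_natCast, List.getD_eq_getElem]

lemma pvPos2 (fa : List (List (Int × Int))) (p : Int × Int) (hp : pvPosOK fa p) :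
    -((fa[pvNN fa.length p.1]'(pvNN_lt hp.1.1 hp.1.2)).length : Int) ≤ p.2 ∧
      p.2 < ((fa[pvNN fa.length p.1]'(pvNN_lt hp.1.1 hp.1.2)).length : Int) := by
  have := hp.2
  rwa [pvRowD fa p hp.1.1 hp.1.2] at this

lemma pvRead_eq (fa : List (List (Int × Int))) (p : Int × Int) (hp : pvPosOK fa p) :
    (PySem.List.pyGet? fa p.1).bind (fun row => PySem.List.pyGet? row p.2)
      = some ((fa[pvNN fa.length p.1]'(pvNN_lt hp.1.1 hp.1.2))[pvNN (fa[pvNN fa.length p.1]'(pvNN_lt hp.1.1 hp.1.2)).length p.2]'(pvNN_lt (pvPos2 fa p hp).1 (pvPos2 fa p hp).2)) := by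
  rw [pvGet_norm hp.1.1 hp.1.2, List.getElem?_eq_getElem (pvNN_lt hp.1.1 hp.1.2)]
  simp only [Option.bind_some]
  rw [pvGet_norm (pvPos2 fa p hp).1 (pvPos2 fa p hp).2,
      List.getElem?_eq_getElem (pvNN_lt (pvPos2 fa p hp).1 (pvPos2 fa p hp).2)]

-- proof-only: the canonical (non-negative) cell a food position refers to
def pvNorm (fa : List (List (Int × Int))) (p : Int × Int) : Int × Int :=
  (((pvNN fa.length p.1 : Nat) : Int),
   ((pvNN (fa.getD (pvNN fa.length p.1) []).length p.2 : Nat) : Int))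

lemma pvNorm_eq (fa : List (List (Int × Int))) (p : Int × Int) (hp : pvPosOK fa p) :
    pvNorm fa p
      = (((pvNN fa.length p.1 : Nat) : Int),
         ((pvNN (fa[pvNN fa.length p.1]'(pvNN_lt hp.1.1 hp.1.2)).length p.2 : Nat) : Int)) := by
  unfold pvNorm
  rw [List.getD_eq_getElem fa [] (pvNN_lt hp.1.1 hp.1.2)]

def pvCond (fa : List (List (Int × Int))) (pos : Int × Int) : Bool :=
  decide ((PySem.List.pyGetD (PySem.List.pyGetD fa pos.1 []) pos.2 (0, 0)).1 > 1)

lemma pvCond_eq (fa : List (List (Int × Int))) (p : Int × Int) (hp : pvPosOK fa p) :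
    pvCond fa p = decide (((fa[pvNN fa.length p.1]'(pvNN_lt hp.1.1 hp.1.2))[pvNN (fa[pvNN fa.length p.1]'(pvNN_lt hp.1.1 hp.1.2)).length p.2]'(pvNN_lt (pvPos2 fa p hp).1 (pvPos2 fa p hp).2)).1 > 1) := by
  unfold pvCond
  rw [pvGetD_norm [] hp.1.1 hp.1.2, pvGetD_norm (0,0) (pvPos2 fa p hp).1 (pvPos2 fa p hp).2]

-- the attribute grid rebuilt from a cell predicate
def pvGridOf (fa : List (List (Int × Int))) (S : Int × Int → Bool) : List (List (Int × Int)) :=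
  (PySem.List.enumerate fa 0).map (fun ir =>
    (PySem.List.enumerate ir.2 0).map (fun jc =>
      if S (ir.1, jc.1) then pvAge jc.2 else jc.2))

lemma pvGridOf_false (fa : List (List (Int × Int))) : pvGridOf fa (fun _ => false) = fa := by
  unfold pvGridOf
  simp only [Bool.false_eq_true, if_false]
  calc (PySem.List.enumerate fa 0).map (fun ir => (PySem.List.enumerate ir.2 0).map (fun jc => jc.2))
      = (PySem.List.enumerate fa 0).map (fun ir => ir.2) := by
        apply List.map_congr_left; intro ir _; exact PySem.List.map_snd_enumerate ir.2 0
    _ = fa := PySem.List.map_snd_enumerate fa 0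

lemma pvLength_gridOf (fa : List (List (Int × Int))) (S : Int × Int → Bool) :
    (pvGridOf fa S).length = fa.length := by
  unfold pvGridOf; simp [PySem.List.length_enumerate]

lemma pvGridOf_getElem (fa : List (List (Int × Int))) (S : Int × Int → Bool) (k : Nat)
    (hk : k < fa.length) :
    (pvGridOf fa S)[k]'(by rw [pvLength_gridOf]; exact hk)
      = (PySem.List.enumerate (fa[k]'hk) 0).map (fun jc =>
          if S ((k : Int), jc.1) then pvAge jc.2 else jc.2) := by
  unfold pvGridOf
  rw [List.getElem_map, PySem.List.getElem_enumerate]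
  simp

-- the boolean mask with fa's shape, holding a cell predicate
def pvMaskOf (fa : List (List (Int × Int))) (S : Int × Int → Bool) : List (List Bool) :=
  (PySem.List.enumerate fa 0).map (fun ir =>
    (PySem.List.enumerate ir.2 0).map (fun jc => S (ir.1, jc.1)))

lemma pvLength_maskOf (fa : List (List (Int × Int))) (S : Int × Int → Bool) :
    (pvMaskOf fa S).length = fa.length := by
  unfold pvMaskOf; simp [PySem.List.length_enumerate]

lemma pvMaskOf_getElem (fa : List (List (Int × Int))) (S : Int × Int → Bool) (k : Nat)
    (hk : k < fa.length) :
    (pvMaskOf fa S)[k]'(by rw [pvLength_maskOf]; exact hk)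
      = (PySem.List.enumerate (fa[k]'hk) 0).map (fun jc => S ((k : Int), jc.1)) := by
  unfold pvMaskOf
  rw [List.getElem_map, PySem.List.getElem_enumerate]
  simp

lemma pvMaskOf_false (fa : List (List (Int × Int))) :
    pvMaskOf fa (fun _ => false) = fa.map (fun row => row.map (fun _ => false)) := by
  apply List.ext_getElem
  · simp [pvLength_maskOf]
  intro k hk1 hk2
  have hkfa : k < fa.length := by simpa [pvLength_maskOf] using hk1
  rw [pvMaskOf_getElem fa _ k hkfa, List.getElem_map]
  apply List.ext_getElem
  · simp [PySem.List.length_enumerate]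
  intro j hj1 hj2
  rw [List.getElem_map, List.getElem_map]

def pvStepM (M : List (List Bool)) (p : Int × Int) : List (List Bool) :=
  PySem.List.pySetD M p.1
    (PySem.List.pySetD (PySem.List.pyGetD M p.1 []) p.2 true)

lemma pvStepM_mask (fa : List (List (Int × Int))) (S : Int × Int → Bool) (p : Int × Int)
    (hp : pvPosOK fa p) :
    pvStepM (pvMaskOf fa S) p = pvMaskOf fa (fun q => S q || (pvNorm fa p == q)) := by
  have hni : pvNN fa.length p.1 < fa.length := pvNN_lt hp.1.1 hp.1.2
  set ni := pvNN fa.length p.1 with hni_def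
  set row := fa[ni]'hni with hrow_def
  have hnj : pvNN row.length p.2 < row.length :=
    pvNN_lt (pvPos2 fa p hp).1 (pvPos2 fa p hp).2
  set nj := pvNN row.length p.2 with hnj_def
  have hM1 : -( (pvMaskOf fa S).length : Int) ≤ p.1 ∧ p.1 < ((pvMaskOf fa S).length : Int) := by
    rw [pvLength_maskOf]; exact hp.1
  have hMnn : pvNN (pvMaskOf fa S).length p.1 = ni := by rw [pvLength_maskOf]
  have hGet : PySem.List.pyGetD (pvMaskOf fa S) p.1 []
      = (PySem.List.enumerate row 0).map (fun jc => S ((ni : Int), jc.1)) := by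
    rw [pvGetD_norm [] hM1.1 hM1.2]
    have := pvMaskOf_getElem fa S ni hni
    simp only [← hrow_def] at this
    rw [← this]
    congr 1
  have hlenInner : ((PySem.List.enumerate row 0).map (fun jc => S ((ni : Int), jc.1))).length
      = row.length := by
    simp [PySem.List.length_enumerate]
  unfold pvStepM
  rw [hGet, pvSetD_norm (xs := pvMaskOf fa S) _ hM1.1 hM1.2,
      pvSetD_norm (xs := (PySem.List.enumerate row 0).map (fun jc => S ((ni : Int), jc.1))) _
        (by rw [hlenInner]; exact (pvPos2 fa p hp).1) (by rw [hlenInner]; exact (pvPos2 fa p hp).2)]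
  have hnnInner : pvNN ((PySem.List.enumerate row 0).map (fun jc => S ((ni : Int), jc.1))).length p.2 = nj := by
    rw [hlenInner]
  rw [hnnInner, hMnn]
  apply List.ext_getElem
  · simp [pvLength_maskOf]
  intro k hk1 hk2
  have hkfa : k < fa.length := by simpa [pvLength_maskOf] using hk1
  rw [pvMaskOf_getElem fa (fun q => S q || (pvNorm fa p == q)) k hkfa]
  rw [List.getElem_set]
  by_cases hkni : ni = k
  · rw [if_pos hkni]
    subst hkni
    apply List.ext_getElem
    · simp [PySem.List.length_enumerate, hlenInner, ← hrow_def]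
    intro j hj1 hj2
    have hjrow : j < row.length := by simpa [hlenInner] using hj1
    rw [List.getElem_set]
    simp only [← hrow_def]
    by_cases hjnj : nj = j
    · subst hjnj
      rw [if_pos rfl]
      rw [List.getElem_map, PySem.List.getElem_enumerate]
      simp only [zero_add]
      have hbeq : (pvNorm fa p == ((ni : Int), (nj : Int))) = true := by
        rw [pvNorm_eq fa p hp]
        simp [← hni_def, ← hrow_def, ← hnj_def]
      rw [hbeq, Bool.or_true]
    · rw [if_neg hjnj]
      have hbeq : (pvNorm fa p == ((ni : Int), (j : Int))) = false := by
        rw [pvNorm_eq fa p hp]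
        simp only [← hni_def, ← hrow_def, ← hnj_def]
        simp only [beq_eq_false_iff_ne, ne_eq, Prod.mk.injEq, Int.natCast_inj, not_and]
        intro _ h; exact hjnj h
      rw [List.getElem_map, List.getElem_map, PySem.List.getElem_enumerate]
      simp only [zero_add, hbeq, Bool.or_false]
  · rw [if_neg hkni]
    rw [pvMaskOf_getElem fa S k hkfa]
    apply List.map_congr_left
    intro jc _
    have hbeq : (pvNorm fa p == ((k : Int), jc.1)) = false := by
      rw [pvNorm_eq fa p hp]
      simp only [← hni_def, ← hrow_def, ← hnj_def]
      simp only [beq_eq_false_iff_ne, ne_eq, Prod.mk.injEq, not_and]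
      intro h; exact absurd (by exact_mod_cast h) hkni
    rw [hbeq, Bool.or_false]

lemma pvFoldM (fa : List (List (Int × Int))) (L : List (Int × Int))
    (hL : ∀ p ∈ L, pvPosOK fa p) (S : Int × Int → Bool) :
    L.foldl pvStepM (pvMaskOf fa S)
      = pvMaskOf fa (fun q => S q || L.any (fun p => pvNorm fa p == q)) := by
  induction L generalizing S with
  | nil => simp
  | cons p L ih =>
    simp only [List.foldl_cons]
    rw [pvStepM_mask fa S p (hL p (by simp))]
    rw [ih (fun p' hp' => hL p' (by simp [hp']))]
    apply congrArg; funext q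
    simp [List.any_cons, Bool.or_assoc]

lemma pvMask_lookup (fa : List (List (Int × Int))) (S : Int × Int → Bool) (i j : Nat)
    (hi : i < fa.length) (hj : j < (fa[i]'hi).length) :
    PySem.List.pyGetD (PySem.List.pyGetD (pvMaskOf fa S) ((i : Nat) : Int) []) ((j : Nat) : Int) false
      = S (((i : Nat) : Int), ((j : Nat) : Int)) := by
  rw [PySem.List.pyGetD_natCast (pvMaskOf fa S) i [],
      List.getD_eq_getElem (pvMaskOf fa S) [] (by rw [pvLength_maskOf]; exact hi)]
  rw [pvMaskOf_getElem fa S i hi, PySem.List.pyGetD_natCast,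
      List.getD_eq_getElem _ false (by simpa [PySem.List.length_enumerate] using hj)]
  rw [List.getElem_map, PySem.List.getElem_enumerate]
  simp

lemma pvGrid_from_mask (fa : List (List (Int × Int))) (S : Int × Int → Bool) :
    (PySem.List.enumerate fa 0).map (fun ir =>
      (PySem.List.enumerate ir.2 0).map (fun jc =>
        if PySem.List.pyGetD (PySem.List.pyGetD (pvMaskOf fa S) ir.1 []) jc.1 false
        then pvAge jc.2 else jc.2))
      = pvGridOf fa S := by
  apply List.ext_getElem
  · simp [pvLength_gridOf, PySem.List.length_enumerate]
  intro k hk1 hk2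
  have hkfa : k < fa.length := by simpa [PySem.List.length_enumerate] using hk1
  rw [List.getElem_map, pvGridOf_getElem fa S k hkfa]
  apply List.ext_getElem
  · simp [PySem.List.length_enumerate, PySem.List.getElem_enumerate]
  intro j hj1 hj2
  have hjrow : j < (fa[k]'hkfa).length := by
    simpa [PySem.List.length_enumerate, PySem.List.getElem_enumerate] using hj1
  simp only [List.getElem_map, PySem.List.getElem_enumerate, zero_add]
  rw [pvMask_lookup fa S k j hkfa hjrow]

def pvStepG (fa : List (List (Int × Int))) (G : List (List (Int × Int))) (p : Int × Int) : List (List (Int × Int)) :=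
  match (PySem.List.pyGet? fa p.1).bind (fun row => PySem.List.pyGet? row p.2) with
  | none => G
  | some lv =>
    PySem.List.pySetD G p.1
      (PySem.List.pySetD (PySem.List.pyGetD G p.1 []) p.2 (if lv.1 - 1 ≤ 0 then (0, 0) else (lv.1 - 1, lv.2)))

lemma pvStepG_grid (fa : List (List (Int × Int))) (S : Int × Int → Bool) (p : Int × Int)
    (hp : pvPosOK fa p) :
    pvStepG fa (pvGridOf fa S) p
      = pvGridOf fa (fun q => S q || (pvNorm fa p == q)) := by
  have hni : pvNN fa.length p.1 < fa.length := pvNN_lt hp.1.1 hp.1.2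
  set ni := pvNN fa.length p.1 with hni_def
  set row := fa[ni]'hni with hrow_def
  have hnj : pvNN row.length p.2 < row.length :=
    pvNN_lt (pvPos2 fa p hp).1 (pvPos2 fa p hp).2
  set nj := pvNN row.length p.2 with hnj_def
  have hG1 : -( (pvGridOf fa S).length : Int) ≤ p.1 ∧ p.1 < ((pvGridOf fa S).length : Int) := by
    rw [pvLength_gridOf]; exact hp.1
  have hGnn : pvNN (pvGridOf fa S).length p.1 = ni := by rw [pvLength_gridOf]
  have hGet : PySem.List.pyGetD (pvGridOf fa S) p.1 []
      = (PySem.List.enumerate row 0).map (fun jc =>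
          if S ((ni : Int), jc.1) then pvAge jc.2 else jc.2) := by
    rw [pvGetD_norm [] hG1.1 hG1.2]
    have := pvGridOf_getElem fa S ni hni
    simp only [← hrow_def] at this
    rw [← this]
    congr 1
  have hlenInner : ((PySem.List.enumerate row 0).map (fun jc =>
      if S ((ni : Int), jc.1) then pvAge jc.2 else jc.2)).length = row.length := by
    simp [PySem.List.length_enumerate]
  unfold pvStepG
  rw [pvRead_eq fa p hp]
  simp only [← hni_def, ← hrow_def, ← hnj_def]
  rw [hGet, pvSetD_norm (xs := pvGridOf fa S) _ hG1.1 hG1.2,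
      pvSetD_norm (xs := (PySem.List.enumerate row 0).map (fun jc =>
        if S ((ni : Int), jc.1) then pvAge jc.2 else jc.2)) _
        (by rw [hlenInner]; exact (pvPos2 fa p hp).1) (by rw [hlenInner]; exact (pvPos2 fa p hp).2)]
  have hnnInner : pvNN ((PySem.List.enumerate row 0).map (fun jc =>
      if S ((ni : Int), jc.1) then pvAge jc.2 else jc.2)).length p.2 = nj := by
    rw [hlenInner]
  rw [hnnInner, hGnn]
  apply List.ext_getElem
  · simp [pvLength_gridOf]
  intro k hk1 hk2
  have hkfa : k < fa.length := by simpa [pvLength_gridOf] using hk1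
  rw [pvGridOf_getElem fa (fun q => S q || (pvNorm fa p == q)) k hkfa]
  rw [List.getElem_set]
  by_cases hkni : ni = k
  · rw [if_pos hkni]
    subst hkni
    apply List.ext_getElem
    · simp [PySem.List.length_enumerate, hlenInner, ← hrow_def]
    intro j hj1 hj2
    have hjrow : j < row.length := by simpa [hlenInner] using hj1
    rw [List.getElem_set]
    simp only [← hrow_def]
    by_cases hjnj : nj = j
    · subst hjnj
      rw [if_pos rfl]
      rw [List.getElem_map, PySem.List.getElem_enumerate]
      simp only [zero_add]
      have hbeq : (pvNorm fa p == ((ni : Int), (nj : Int))) = true := by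
        rw [pvNorm_eq fa p hp]
        simp [← hni_def, ← hrow_def, ← hnj_def]
      rw [hbeq]
      simp only [Bool.or_true, if_true, pvAge]
      by_cases hle : (row[nj]'hjrow).1 - 1 ≤ 0
      · rw [if_neg (by omega : ¬ (row[nj]'hjrow).1 > 1), if_pos hle]
      · rw [if_pos (by omega : (row[nj]'hjrow).1 > 1), if_neg hle]
    · rw [if_neg hjnj]
      have hbeq : (pvNorm fa p == ((ni : Int), (j : Int))) = false := by
        rw [pvNorm_eq fa p hp]
        simp only [← hni_def, ← hrow_def, ← hnj_def]
        simp only [beq_eq_false_iff_ne, ne_eq, Prod.mk.injEq, Int.natCast_inj, not_and]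
        intro _ h; exact hjnj h
      rw [List.getElem_map, List.getElem_map, PySem.List.getElem_enumerate]
      simp only [zero_add, hbeq, Bool.or_false]
  · rw [if_neg hkni]
    rw [pvGridOf_getElem fa S k hkfa]
    apply List.map_congr_left
    intro jc _
    have hbeq : (pvNorm fa p == ((k : Int), jc.1)) = false := by
      rw [pvNorm_eq fa p hp]
      simp only [← hni_def, ← hrow_def, ← hnj_def]
      simp only [beq_eq_false_iff_ne, ne_eq, Prod.mk.injEq, not_and]
      intro h; exact absurd (by exact_mod_cast h) hkni
    rw [hbeq, Bool.or_false]

lemma pvFoldG (fa : List (List (Int × Int))) (L : List (Int × Int))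
    (hL : ∀ p ∈ L, pvPosOK fa p) (S : Int × Int → Bool) :
    L.foldl (pvStepG fa) (pvGridOf fa S)
      = pvGridOf fa (fun q => S q || L.any (fun p => pvNorm fa p == q)) := by
  induction L generalizing S with
  | nil => simp
  | cons p L ih =>
    simp only [List.foldl_cons]
    rw [pvStepG_grid fa S p (hL p (by simp))]
    rw [ih (fun p' hp' => hL p' (by simp [hp']))]
    apply congrArg; funext q
    simp [List.any_cons, Bool.or_assoc]

lemma pvFoldG' (fa : List (List (Int × Int))) (L : List (Int × Int))
    (hL : ∀ p ∈ L, pvPosOK fa p) :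
    L.foldl (pvStepG fa) fa
      = pvGridOf fa (fun q => L.any (fun p => pvNorm fa p == q)) := by
  have h := pvFoldG fa L hL (fun _ => false)
  rw [pvGridOf_false fa] at h
  rw [h]
  apply congrArg; funext q; simp

def pvStepF (fa : List (List (Int × Int))) (nf : List (Int × Int)) (p : Int × Int) : List (Int × Int) :=
  match (PySem.List.pyGet? fa p.1).bind (fun row => PySem.List.pyGet? row p.2) with
  | none => nf
  | some lv => if lv.1 - 1 ≤ 0 then nf else nf ++ [p]

lemma pvFoldF (fa : List (List (Int × Int))) (L : List (Int × Int))
    (hL : ∀ p ∈ L, pvPosOK fa p) (nf : List (Int × Int)) :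
    L.foldl (pvStepF fa) nf = nf ++ L.filter (fun pos => pvCond fa pos) := by
  induction L generalizing nf with
  | nil => simp
  | cons p L ih =>
    have hp := hL p (by simp)
    simp only [List.foldl_cons, List.filter_cons]
    have hstep : pvStepF fa nf p = if pvCond fa p then nf ++ [p] else nf := by
      unfold pvStepF
      simp only [pvRead_eq fa p hp, pvCond_eq fa p hp, decide_eq_true_eq]
      by_cases hle : ((fa[pvNN fa.length p.1]'(pvNN_lt hp.1.1 hp.1.2))[pvNN (fa[pvNN fa.length p.1]'(pvNN_lt hp.1.1 hp.1.2)).length p.2]'(pvNN_lt (pvPos2 fa p hp).1 (pvPos2 fa p hp).2)).1 - 1 ≤ 0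
      · rw [if_pos hle, if_neg (by omega)]
      · rw [if_neg hle, if_pos (by omega)]
    rw [hstep]
    by_cases hc : pvCond fa p
    · rw [if_pos hc, if_pos hc, ih (fun p' hp' => hL p' (by simp [hp'])), List.append_assoc]
      rfl
    · rw [if_neg hc, if_neg (by simpa using hc), ih (fun p' hp' => hL p' (by simp [hp']))]

lemma pvFold_split (fa : List (List (Int × Int))) (L : List (Int × Int))
    (nf : List (Int × Int)) (G : List (List (Int × Int))) :
    L.foldl (fun st food_pos =>
      match (PySem.List.pyGet? fa food_pos.1).bind (fun row => PySem.List.pyGet? row food_pos.2) with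
      | none => st
      | some lv =>
        let new_lifespan := lv.1 - 1
        if new_lifespan ≤ 0 then
          (st.1, PySem.List.pySetD st.2 food_pos.1
                   (PySem.List.pySetD (PySem.List.pyGetD st.2 food_pos.1 []) food_pos.2 (0, 0)))
        else
          (st.1 ++ [food_pos], PySem.List.pySetD st.2 food_pos.1
                   (PySem.List.pySetD (PySem.List.pyGetD st.2 food_pos.1 []) food_pos.2 (new_lifespan, lv.2))))
      (nf, G)
    = (L.foldl (pvStepF fa) nf, L.foldl (pvStepG fa) G) := by
  induction L generalizing nf G with
  | nil => rfl
  | cons p L ih =>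
    simp only [List.foldl_cons]
    rw [← ih]
    congr 1
    unfold pvStepF pvStepG
    rcases h : (PySem.List.pyGet? fa p.1).bind (fun row => PySem.List.pyGet? row p.2) with _ | lv
    · simp
    · simp only []
      by_cases hc : lv.1 - 1 ≤ 0 <;> simp [hc]

lemma pvAlt_def (food : List (Int × Int)) (fa : List (List (Int × Int))) :
    update_food_lifespans_alt food fa
      = (food.filter (fun pos =>
           decide ((PySem.List.pyGetD (PySem.List.pyGetD fa pos.1 []) pos.2 (0, 0)).1 > 1)),
         (PySem.List.enumerate fa 0).map (fun ir =>
           (PySem.List.enumerate ir.2 0).map (fun jc =>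
             if PySem.List.pyGetD (PySem.List.pyGetD
                  (food.foldl pvStepM (fa.map (fun row => row.map (fun _ => false)))) ir.1 []) jc.1 false
             then pvAge jc.2 else jc.2))) := rfl

-- ===== VERDICT (by name: the statement is the Claim_ definition above) =====
theorem update_food_lifespans_spec : Claim_equal_update_food_lifespans := by
  intro food fa _hdom hpre
  unfold Spec_update_food_lifespans
  unfold update_food_lifespans
  have hinit : fa.map (fun row => PySem.List.slice row none none) = fa := by
    simp [PySem.List.slice_none_none]
  rw [hinit, pvFold_split fa food [] fa, pvFoldF fa food hpre [], List.nil_append,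
      pvFoldG' fa food hpre]
  rw [pvAlt_def, ← pvMaskOf_false fa, pvFoldM fa food hpre (fun _ => false)]
  simp only [Bool.false_or]
  rw [pvGrid_from_mask fa (fun q => food.any (fun p => pvNorm fa p == q))]
  rfl
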